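-- pv_equiv track=rewrite | github.com/iamkissg/leetcode | interview/微软/顺时针打印矩阵.py | oneCircle
-- ===== SOURCE A (Python) =====
-- from typing import List
--
-- def oneCircle(matrix: List[List[int]], start, n_row, n_col):
--     res = []
--     end_row = n_row-start-1  # [start, end_row]
--     end_col = n_col-start-1  # [start, end_col]
--
--     for col in range(start, end_col+1):
--         res.append(matrix[start][col])
--
--     for row in range(start+1, end_row+1):
--         res.append(matrix[row][end_col])
--
--     # 条件判断: 高瘦和矮胖型的矩阵, 不必再跑一趟,
--
--     if start < end_row:
--         for col in range(end_col-1, start-1, -1):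
--             res.append(matrix[end_row][col])
--
--     if start < end_col:
--         for row in range(end_row-1, start, -1):
--             res.append(matrix[row][start])
--
--     return res
-- ===== SOURCE B (Python) =====
-- from typing import List
--
-- def oneCircle(matrix: List[List[int]], start, n_row, n_col):
--     # Single turning walk around the ring instead of four directional loops.
--     end_row = n_row - start - 1
--     end_col = n_col - start - 1
--     rows = end_row - start + 1
--     cols = end_col - start + 1
--     if rows <= 0 or cols <= 0:
--         return []
--     if rows == 1:
--         count = cols
--     elif cols == 1:
--         count = rows
--     else:
--         count = 2 * rows + 2 * cols - 4
--     res = []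
--     r, c = start, start
--     dr, dc = 0, 1
--     for _ in range(count):
--         res.append(matrix[r][c])
--         nr, nc = r + dr, c + dc
--         if not (start <= nr <= end_row and start <= nc <= end_col):
--             dr, dc = dc, -dr  # rotate clockwise
--             nr, nc = r + dr, c + dc
--         r, c = nr, nc
--     return res
-- ===== Notes on version B (the rewrite author's own statement) =====
-- stated objective: alternative
-- what changed: Replaces A's four directional loops and their thin-matrix guards by a single turning walk: compute the exact cell count of the ring, then step a (row,col) cursor whose heading rotates clockwise whenever the tentative next cell would leave the ring bounds.
-- outside the precondition, e.g. on oneCircle([[1, 2], [3, 4]], 0, 2, 0): A returns [4], B returns []; on oneCircle([[5, 2]], -1, 0, 0): A returns [2, 5, 5, 2], B returns [2, 5, 5, 2]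
import Mathlib
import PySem

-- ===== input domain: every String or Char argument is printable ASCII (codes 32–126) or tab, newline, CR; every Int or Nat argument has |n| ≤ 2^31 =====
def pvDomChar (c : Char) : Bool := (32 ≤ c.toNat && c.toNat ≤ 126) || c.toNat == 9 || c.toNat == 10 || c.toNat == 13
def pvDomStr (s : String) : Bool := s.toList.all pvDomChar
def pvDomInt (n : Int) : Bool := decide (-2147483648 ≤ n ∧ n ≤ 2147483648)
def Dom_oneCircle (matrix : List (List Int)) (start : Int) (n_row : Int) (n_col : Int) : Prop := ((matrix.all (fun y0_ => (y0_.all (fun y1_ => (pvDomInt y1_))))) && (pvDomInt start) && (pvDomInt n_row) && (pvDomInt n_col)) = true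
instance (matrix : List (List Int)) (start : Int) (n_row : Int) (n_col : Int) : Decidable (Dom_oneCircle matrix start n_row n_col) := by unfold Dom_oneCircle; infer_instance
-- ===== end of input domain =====

-- B replaces A's four directional loops (with thin-matrix guards) by a single turning
-- cursor walk over the ring; an alternative decomposition of the same cost.

-- shared indexing helper: matrix[r][c]; exact under Pre_ (every touched index in range)
def pvIdx (m : List (List Int)) (r c : Int) : Int :=
  PySem.List.pyGetD (PySem.List.pyGetD m r []) c 0

-- ===== PORT A =====
def oneCircle (matrix : List (List Int)) (start : Int) (n_row : Int) (n_col : Int) : List Int :=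
  let res : List Int := []
  let end_row := n_row - start - 1
  let end_col := n_col - start - 1
  let res := (PySem.List.pyRange start (end_col + 1) 1).foldl
      (fun acc col => acc ++ [pvIdx matrix start col]) res
  let res := (PySem.List.pyRange (start + 1) (end_row + 1) 1).foldl
      (fun acc row => acc ++ [pvIdx matrix row end_col]) res
  let res := if start < end_row then
      (PySem.List.pyRange (end_col - 1) (start - 1) (-1)).foldl
        (fun acc col => acc ++ [pvIdx matrix end_row col]) res
    else res
  let res := if start < end_col then
      (PySem.List.pyRange (end_row - 1) start (-1)).foldl
        (fun acc row => acc ++ [pvIdx matrix row start]) res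
    else res
  res

-- ===== PORT B =====
-- the turning walk of Source B: emit the current cell, tentatively step; if the step leaves
-- the ring, rotate the heading clockwise ((dr,dc) := (dc,-dr)) before stepping
def pvRing (m : List (List Int)) (s er ec : Int) :
    Nat → Int → Int → Int → Int → List Int
  | 0, _, _, _, _ => []
  | Nat.succ n, r, c, dr, dc =>
    let nr := r + dr
    let nc := c + dc
    if s ≤ nr ∧ nr ≤ er ∧ s ≤ nc ∧ nc ≤ ec then
      pvIdx m r c :: pvRing m s er ec n nr nc dr dc
    else
      pvIdx m r c :: pvRing m s er ec n (r + dc) (c - dr) dc (-dr)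

def oneCircle_alt (matrix : List (List Int)) (start : Int) (n_row : Int) (n_col : Int) : List Int :=
  let end_row := n_row - start - 1
  let end_col := n_col - start - 1
  let rows := end_row - start + 1
  let cols := end_col - start + 1
  if rows ≤ 0 ∨ cols ≤ 0 then []
  else
    let count := if rows = 1 then cols else if cols = 1 then rows else 2 * rows + 2 * cols - 4
    pvRing matrix start end_row end_col count.toNat start start 0 1

-- ===== PRECONDITION & SPEC =====
-- Pre_ is A's natural domain: either 0 ≤ start with a nonempty ring
-- [start, n_row-start-1] × [start, n_col-start-1] whose cells all exist in the matrix (every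
-- index A touches is a valid nonnegative index), or a fully empty ring (A touches nothing and
-- returns []); on the remaining malformed inputs A raises IndexError or its value comes from
-- Python negative indices landing in unrelated cells, which no caller would specify.
def Pre_oneCircle (matrix : List (List Int)) (start : Int) (n_row : Int) (n_col : Int) : Prop :=
  (0 ≤ start ∧ start ≤ n_row - start - 1 ∧ start ≤ n_col - start - 1 ∧
    n_row - start - 1 < (matrix.length : Int) ∧
    ∀ i ∈ PySem.List.pyRange start (n_row - start) 1,
      n_col - start - 1 < ((PySem.List.pyGetD matrix i []).length : Int)) ∨
  (n_row - start - 1 ≤ start ∧ n_col - start - 1 < start)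
instance (matrix : List (List Int)) (start : Int) (n_row : Int) (n_col : Int) : Decidable (Pre_oneCircle matrix start n_row n_col) := by unfold Pre_oneCircle; infer_instance
def pvWitness_oneCircle : List (List Int) × Int × Int × Int := ([[1, 2], [3, 4]], 0, 2, 2)

def Spec_oneCircle (matrix : List (List Int)) (start : Int) (n_row : Int) (n_col : Int) (out : List Int) : Prop := out = oneCircle_alt matrix start n_row n_col
instance (matrix : List (List Int)) (start : Int) (n_row : Int) (n_col : Int) (out : List Int) : Decidable (Spec_oneCircle matrix start n_row n_col out) := by unfold Spec_oneCircle; infer_instance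

-- ===== CLAIM (what is proved, stated in full; the proofs are below) =====
def Claim_equal_oneCircle : Prop := ∀ (matrix : List (List Int)) (start : Int) (n_row : Int) (n_col : Int), Dom_oneCircle matrix start n_row n_col → Pre_oneCircle matrix start n_row n_col → Spec_oneCircle matrix start n_row n_col (oneCircle matrix start n_row n_col)

-- ===== LEMMAS AND PROOFS =====

theorem ring_right (m : List (List Int)) (s er ec : Int) (hre : s ≤ er) :
    ∀ (k n : Nat) (c : Int), s ≤ c → c + k = ec →
      pvRing m s er ec (k + 1 + n) s c 0 1 =
        (PySem.List.pyRange c (ec + 1) 1).map (fun j => pvIdx m s j)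
          ++ pvRing m s er ec n (s + 1) ec 1 0 := by
  intro k
  induction k with
  | zero =>
    intro n c hc hce
    have hc' : c = ec := by omega
    subst hc'
    have h1 : 0 + 1 + n = n + 1 := by omega
    rw [h1]
    simp only [pvRing]
    rw [if_neg (by omega)]
    simp [PySem.List.pyRange_one_singleton]
  | succ k ih =>
    intro n c hc hce
    have h1 : k + 1 + 1 + n = (k + 1 + n) + 1 := by omega
    rw [h1]
    simp only [pvRing]
    simp only [add_zero]
    rw [if_pos (by push_cast at hce; omega)]
    rw [PySem.List.pyRange_one_cons (show c < ec + 1 by push_cast at hce; omega)]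
    rw [ih n (c + 1) (by omega) (by push_cast at hce ⊢; omega)]
    simp

theorem ring_down (m : List (List Int)) (s er ec : Int) (hce : s ≤ ec) :
    ∀ (k n : Nat) (r : Int), s ≤ r → r + k = er →
      pvRing m s er ec (k + 1 + n) r ec 1 0 =
        (PySem.List.pyRange r (er + 1) 1).map (fun j => pvIdx m j ec)
          ++ pvRing m s er ec n er (ec - 1) 0 (-1) := by
  intro k
  induction k with
  | zero =>
    intro n r hr hre
    have hr' : r = er := by omega
    subst hr'
    have h1 : 0 + 1 + n = n + 1 := by omega
    rw [h1]
    simp only [pvRing]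
    simp only [add_zero]
    rw [if_neg (by omega)]
    simp [PySem.List.pyRange_one_singleton]
  | succ k ih =>
    intro n r hr hre
    have h1 : k + 1 + 1 + n = (k + 1 + n) + 1 := by omega
    rw [h1]
    simp only [pvRing]
    simp only [add_zero]
    rw [if_pos (by push_cast at hre; omega)]
    rw [PySem.List.pyRange_one_cons (show r < er + 1 by push_cast at hre; omega)]
    rw [ih n (r + 1) (by omega) (by push_cast at hre ⊢; omega)]
    simp

theorem ring_left (m : List (List Int)) (s er ec : Int) (hre : s ≤ er) :
    ∀ (k n : Nat) (c : Int), c ≤ ec → c - k = s →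
      pvRing m s er ec (k + 1 + n) er c 0 (-1) =
        (PySem.List.pyRange c (s - 1) (-1)).map (fun j => pvIdx m er j)
          ++ pvRing m s er ec n (er - 1) s (-1) 0 := by
  intro k
  induction k with
  | zero =>
    intro n c hc hcs
    have hc' : c = s := by omega
    subst hc'
    have h1 : 0 + 1 + n = n + 1 := by omega
    rw [h1]
    simp only [pvRing]
    simp only [add_zero]
    rw [if_neg (by omega)]
    rw [PySem.List.pyRange_neg_one_cons (by omega)]
    rw [PySem.List.pyRange_neg_one_eq_nil (by omega)]
    simp [sub_eq_add_neg]
  | succ k ih =>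
    intro n c hc hcs
    have h1 : k + 1 + 1 + n = (k + 1 + n) + 1 := by omega
    rw [h1]
    simp only [pvRing]
    simp only [add_zero]
    rw [if_pos (by push_cast at hcs; omega)]
    rw [PySem.List.pyRange_neg_one_cons (show s - 1 < c by push_cast at hcs; omega)]
    rw [show c + -1 = c - 1 by ring]
    rw [ih n (c - 1) (by omega) (by push_cast at hcs ⊢; omega)]
    simp [sub_eq_add_neg]

theorem ring_up (m : List (List Int)) (s er ec : Int) (hce : s ≤ ec) :
    ∀ (k : Nat) (r : Int), r ≤ er → s ≤ r - k →
      pvRing m s er ec k r s (-1) 0 =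
        (PySem.List.pyRange r (r - k) (-1)).map (fun j => pvIdx m j s) := by
  intro k
  induction k with
  | zero =>
    intro r hr hs
    simp [pvRing, PySem.List.pyRange_neg_one_eq_nil]
  | succ k ih =>
    intro r hr hs
    simp only [pvRing]
    simp only [add_zero]
    rw [if_pos (by push_cast at hs; omega)]
    rw [PySem.List.pyRange_neg_one_cons (show r - ((k:Nat)+1:Nat) < r by push_cast at hs ⊢; omega)]
    rw [show r + -1 = r - 1 by ring]
    rw [ih (r - 1) (by omega) (by push_cast at hs ⊢; omega)]
    have : r - ((k:Nat)+1:Nat) = r - 1 - (k:Int) := by push_cast; ring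
    rw [this]
    simp [sub_eq_add_neg]


theorem oneCircle_eq (m : List (List Int)) (s n_row n_col : Int) :
    oneCircle m s n_row n_col =
      (PySem.List.pyRange s (n_col - s - 1 + 1) 1).map (fun c => pvIdx m s c)
      ++ (PySem.List.pyRange (s + 1) (n_row - s - 1 + 1) 1).map (fun r => pvIdx m r (n_col - s - 1))
      ++ (if s < n_row - s - 1 then
            (PySem.List.pyRange (n_col - s - 1 - 1) (s - 1) (-1)).map (fun c => pvIdx m (n_row - s - 1) c)
          else [])
      ++ (if s < n_col - s - 1 then
            (PySem.List.pyRange (n_row - s - 1 - 1) s (-1)).map (fun r => pvIdx m r s)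
          else []) := by
  simp only [oneCircle, PySem.List.foldl_append_singleton_eq_map]
  split_ifs <;> simp [List.append_assoc]

theorem ring_case (m : List (List Int)) (s er ec : Int)
    (_h0 : 0 ≤ s) (h1 : s ≤ er) (h2 : s ≤ ec) :
    oneCircle m s (er + s + 1) (ec + s + 1) = oneCircle_alt m s (er + s + 1) (ec + s + 1) := by
  have hr : er + s + 1 - s - 1 = er := by ring
  have hc : ec + s + 1 - s - 1 = ec := by ring
  rw [oneCircle_eq]
  simp only [oneCircle_alt, hr, hc]
  rw [if_neg (show ¬(er - s + 1 ≤ 0 ∨ ec - s + 1 ≤ 0) by omega)]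
  by_cases hr1 : er = s
  · -- single row
    rw [if_pos (show er - s + 1 = 1 by omega)]
    have hft : (ec - s + 1).toNat = (ec - s).toNat + 1 + 0 := by omega
    rw [hft, ring_right m s er ec (by omega) _ 0 s (le_refl s) (by omega)]
    rw [if_neg (show ¬ s < er by omega)]
    rw [PySem.List.pyRange_one_eq_nil (show er + 1 ≤ s + 1 by omega)]
    rw [PySem.List.pyRange_neg_one_eq_nil (show er - 1 ≤ s by omega)]
    simp [pvRing]
  · by_cases hc1 : ec = s
    · -- single column, more than one row
      rw [if_neg (show ¬ er - s + 1 = 1 by omega), if_pos (show ec - s + 1 = 1 by omega)]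
      have hft : (er - s + 1).toNat = 0 + 1 + ((er - s - 1).toNat + 1 + 0) := by omega
      rw [hft, ring_right m s er ec (by omega) 0 _ s (le_refl s) (by omega)]
      rw [ring_down m s er ec (by omega) _ 0 (s + 1) (by omega) (by omega)]
      rw [if_pos (show s < er by omega), if_neg (show ¬ s < ec by omega)]
      rw [PySem.List.pyRange_neg_one_eq_nil (show ec - 1 ≤ s - 1 by omega)]
      simp [pvRing]
    · -- general ring
      rw [if_neg (show ¬ er - s + 1 = 1 by omega), if_neg (show ¬ ec - s + 1 = 1 by omega)]
      have hft : (2 * (er - s + 1) + 2 * (ec - s + 1) - 4).toNat =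
          (ec - s).toNat + 1 +
            ((er - s - 1).toNat + 1 + ((ec - 1 - s).toNat + 1 + (er - s - 1).toNat)) := by
        omega
      rw [hft, ring_right m s er ec (by omega) _ _ s (le_refl s) (by omega)]
      rw [ring_down m s er ec (by omega) _ _ (s + 1) (by omega) (by omega)]
      rw [ring_left m s er ec (by omega) _ _ (ec - 1) (by omega) (by omega)]
      rw [ring_up m s er ec (by omega) _ (er - 1) (by omega) (by omega)]
      rw [show er - 1 - ((er - s - 1).toNat : Int) = s by omega]
      rw [if_pos (show s < er by omega), if_pos (show s < ec by omega)]
      simp [List.append_assoc]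

theorem main (m : List (List Int)) (s n_row n_col : Int)
    (h0 : 0 ≤ s) (h1 : s ≤ n_row - s - 1) (h2 : s ≤ n_col - s - 1) :
    oneCircle m s n_row n_col = oneCircle_alt m s n_row n_col := by
  have e1 : n_row = (n_row - s - 1) + s + 1 := by ring
  have e2 : n_col = (n_col - s - 1) + s + 1 := by ring
  rw [e1, e2]
  exact ring_case m s _ _ h0 h1 h2

theorem empty_case (m : List (List Int)) (s n_row n_col : Int)
    (h1 : n_row - s - 1 ≤ s) (h2 : n_col - s - 1 < s) :
    oneCircle m s n_row n_col = oneCircle_alt m s n_row n_col := by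
  simp only [oneCircle_alt]
  rw [oneCircle_eq]
  rw [if_neg (show ¬ s < n_row - s - 1 by omega)]
  rw [if_neg (show ¬ s < n_col - s - 1 by omega)]
  rw [if_pos (show n_row - s - 1 - s + 1 ≤ 0 ∨ n_col - s - 1 - s + 1 ≤ 0 by omega)]
  rw [PySem.List.pyRange_one_eq_nil (by omega), PySem.List.pyRange_one_eq_nil (by omega)]
  simp

-- ===== VERDICT (by name: the statement is the Claim_ definition above) =====
theorem oneCircle_spec : Claim_equal_oneCircle := by
  intro matrix start n_row n_col _ hpre
  rcases hpre with ⟨h0, h1, h2, -, -⟩ | ⟨h1, h2⟩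
  · exact main matrix start n_row n_col h0 h1 h2
  · exact empty_case matrix start n_row n_col h1 h2
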